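-- pv_equiv track=rewrite | github.com/acproject/local_ai_runtime | tests/multiround_chat_stress.py | choose_model
-- ===== SOURCE A (Python) =====
-- from typing import Any, Dict, List, Optional, Tuple
--
-- def choose_model(models: List[str], preferred: Optional[str], contains: Optional[str]) -> str:
--     if preferred:
--         return preferred
--     if contains:
--         needle = contains.lower()
--         candidates = [m for m in models if needle in m.lower()]
--         if candidates:
--             candidates.sort(key=lambda x: (0 if x.startswith("llama_cpp:") else 1, len(x), x))
--             return candidates[0]
--     if not models:
--         raise RuntimeError("no models returned by /v1/models")
--     models = sorted(models)
--     return models[0]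
-- ===== SOURCE B (Python) =====
-- def _key(m):
--     return (0 if m.startswith("llama_cpp:") else 1, len(m), m)
--
-- def choose_model(models, preferred, contains):
--     if preferred:
--         return preferred
--     if contains:
--         needle = contains.lower()
--         best = None
--         for m in models:
--             if needle in m.lower() and (best is None or _key(m) < _key(best)):
--                 best = m
--         if best is not None:
--             return best
--     if not models:
--         raise RuntimeError("no models returned by /v1/models")
--     best = models[0]
--     for m in models[1:]:
--         if m < best:
--             best = m
--     return best
-- ===== Notes on version B (the rewrite author's own statement) =====
-- stated objective: alternative
-- what changed: Both sort-then-take-first patterns are replaced by single-pass running-minimum scans (an Option accumulator over the candidates, a plain min fold over models), so no sorted list is ever built; asymptotically fewer comparisons, but CPython's C-level sort makes the wall-clock cost comparable.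
import Mathlib
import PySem

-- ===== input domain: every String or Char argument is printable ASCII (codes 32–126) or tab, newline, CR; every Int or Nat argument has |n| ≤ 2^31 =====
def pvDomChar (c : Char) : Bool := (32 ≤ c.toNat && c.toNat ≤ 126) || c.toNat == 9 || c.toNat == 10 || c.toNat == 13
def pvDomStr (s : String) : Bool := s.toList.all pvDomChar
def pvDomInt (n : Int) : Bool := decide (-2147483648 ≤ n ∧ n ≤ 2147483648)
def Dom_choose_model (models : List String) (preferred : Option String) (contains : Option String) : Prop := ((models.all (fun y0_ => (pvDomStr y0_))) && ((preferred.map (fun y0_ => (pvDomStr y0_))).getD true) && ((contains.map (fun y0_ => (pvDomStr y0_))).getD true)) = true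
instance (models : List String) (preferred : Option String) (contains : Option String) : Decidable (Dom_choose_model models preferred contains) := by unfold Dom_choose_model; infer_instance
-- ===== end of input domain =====

-- B replaces A's two sort-then-take-first patterns by single-pass running-minimum scans
-- (no sorted list is ever built); objective: alternative (min-scan strategy instead of sorting).


-- ===== PORT A =====
-- shared helper: Python's strict `<` on the key tuple (0 if m.startswith("llama_cpp:") else 1, len(m), m),
-- spelled out lexicographically (both Pythons build exactly this tuple)
def modelFlag (a : String) : Int := if PySem.Str.startswith a "llama_cpp:" then 0 else 1

def modelKeyLt (a b : String) : Bool :=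
  decide (modelFlag a < modelFlag b) ||
    (modelFlag a == modelFlag b &&
      (decide (PySem.Str.len a < PySem.Str.len b) ||
        (PySem.Str.len a == PySem.Str.len b && decide (a < b))))

-- candidates.sort(key=…) with the tuple key is ported as PySem.List.sorted's own insertBy fold
-- (PySem.List.sorted_eq_foldl_insertBy is `rfl`), with the tuple `<` written out as modelKeyLt.
def choose_model (models : List String) (preferred : Option String) (contains : Option String) : String :=
  if preferred.getD "" ≠ "" then preferred.getD ""
  else
    let viaContains : Option String :=
      match contains with
      | none => none
      | some c =>
        if c ≠ "" then
          let needle := PySem.Str.lower c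
          let candidates := models.filter (fun m => PySem.Str.isIn needle (PySem.Str.lower m))
          if candidates ≠ [] then
            some ((candidates.foldl (fun acc x => PySem.List.insertBy modelKeyLt x acc) []).headD "")
          else none
        else none
    match viaContains with
    | some r => r
    | none =>
      -- `if not models: raise RuntimeError(…)` — excluded by Pre_choose_model; "" is unreachable there
      (PySem.List.sorted models (fun x => x) false).headD ""

-- ===== PORT B =====
def choose_model_alt (models : List String) (preferred : Option String) (contains : Option String) : String :=
  if preferred.getD "" ≠ "" then preferred.getD ""
  else
    let best : Option String :=
      match contains with
      | none => none
      | some c =>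
        if c ≠ "" then
          let needle := PySem.Str.lower c
          models.foldl
            (fun best m =>
              if PySem.Str.isIn needle (PySem.Str.lower m) then
                match best with
                | none => some m
                | some b => if modelKeyLt m b then some m else some b
              else best)
            none
        else none
    match best with
    | some r => r
    | none =>
      match models with
      | [] => ""  -- Python raises here; excluded by Pre_choose_model
      | m :: rest => rest.foldl (fun b x => if x < b then x else b) m

-- ===== PRECONDITION & SPEC =====
-- Pre_ excludes exactly the inputs where A raises RuntimeError: preferred falsy (none/"") and models empty
def Pre_choose_model (models : List String) (preferred : Option String) (contains : Option String) : Prop :=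
  preferred.getD "" ≠ "" ∨ models ≠ []
instance (models : List String) (preferred : Option String) (contains : Option String) : Decidable (Pre_choose_model models preferred contains) := by unfold Pre_choose_model; infer_instance

def pvWitness_choose_model : List String × Option String × Option String := (["llama_cpp:a"], none, none)

def Spec_choose_model (models : List String) (preferred : Option String) (contains : Option String) (out : String) : Prop := out = choose_model_alt models preferred contains
instance (models : List String) (preferred : Option String) (contains : Option String) (out : String) : Decidable (Spec_choose_model models preferred contains out) := by unfold Spec_choose_model; infer_instance

-- ===== CLAIM (what is proved, stated in full; the proofs are below) =====
def Claim_equal_choose_model : Prop := ∀ (models : List String) (preferred : Option String) (contains : Option String), Dom_choose_model models preferred contains → Pre_choose_model models preferred contains → Spec_choose_model models preferred contains (choose_model models preferred contains)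

-- ===== LEMMAS AND PROOFS =====

/-- the running-minimum step over an `Option` accumulator (shape of `PySem.List.min?`'s fold) -/
def minStep {α : Type} (before : α → α → Bool) (o : Option α) (x : α) : Option α :=
  match o with
  | none => some x
  | some b => if before x b then some x else some b

theorem head?_insertBy {α : Type} (before : α → α → Bool) (x : α) (ys : List α) :
    (PySem.List.insertBy before x ys).head? = minStep before ys.head? x := by
  cases ys with
  | nil => rfl
  | cons y t =>
    simp only [PySem.List.insertBy, minStep]
    split <;> simp_all

theorem head?_foldl_insertBy {α : Type} (before : α → α → Bool) (xs acc : List α) :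
    (xs.foldl (fun a x => PySem.List.insertBy before x a) acc).head? =
      xs.foldl (minStep before) acc.head? := by
  induction xs generalizing acc with
  | nil => rfl
  | cons x t ih => simp only [List.foldl_cons, ih, head?_insertBy]

theorem foldl_minStep_some {α : Type} (before : α → α → Bool) (t : List α) (a : α) :
    t.foldl (minStep before) (some a) = some (t.foldl (fun b x => if before x b then x else b) a) := by
  induction t generalizing a with
  | nil => rfl
  | cons x s ih =>
    simp only [List.foldl_cons, minStep]
    split <;> simp [ih]

-- sort-then-head equals the running-minimum scan, on a cons literal
theorem head_sort_cons (before : String → String → Bool) (c : String) (t : List String) :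
    ((c :: t).foldl (fun a x => PySem.List.insertBy before x a) []).headD "" =
      t.foldl (fun b x => if before x b then x else b) c := by
  have h := head?_foldl_insertBy before (c :: t) []
  simp only [List.foldl_cons, List.head?_nil, minStep, foldl_minStep_some] at h
  simp [List.headD_eq_head?_getD, h]

-- ===== VERDICT (by name: the statement is the Claim_ definition above) =====
theorem fallback_eq (m : String) (rest : List String) :
    (PySem.List.sorted (m :: rest) (fun x => x) false).headD "" =
      rest.foldl (fun b x => if x < b then x else b) m := by
  rw [PySem.List.sorted_eq_foldl_insertBy, head_sort_cons]
  simp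

theorem choose_model_spec : Claim_equal_choose_model := by
  intro models preferred contains _ hpre
  unfold Spec_choose_model choose_model choose_model_alt
  by_cases hp : preferred.getD "" ≠ ""
  · simp [hp]
  · have hm : models ≠ [] := by
      rcases hpre with h | h
      · exact absurd h hp
      · exact h
    cases models with
    | nil => exact absurd rfl hm
    | cons m rest =>
      simp only [if_neg hp]
      cases contains with
      | none => simpa using fallback_eq m rest
      | some c =>
        by_cases hc : c ≠ ""
        · simp only [if_pos hc]
          rw [PySem.List.foldl_if_eq_foldl_filter]
          cases hcl : (m :: rest).filter
              (fun x => PySem.Str.isIn (PySem.Str.lower c) (PySem.Str.lower x)) with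
          | nil => simpa using fallback_eq m rest
          | cons d t =>
            have h2 : List.foldl
                (fun (best : Option String) x =>
                  match best with
                  | none => some x
                  | some b => if modelKeyLt x b then some x else some b) none (d :: t) =
                some (List.foldl (fun b x => if modelKeyLt x b then x else b) d t) := by
              have he : (fun (best : Option String) (x : String) =>
                  match best with
                  | none => some x
                  | some b => if modelKeyLt x b then some x else some b) = minStep modelKeyLt := by
                funext o x; cases o <;> rfl
              rw [he]
              simp only [List.foldl_cons]
              rw [show minStep modelKeyLt none d = some d from rfl, foldl_minStep_some]
            simp only [h2]
            simpa using head_sort_cons modelKeyLt d t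
        · simp only [ne_eq, not_not] at hc
          subst hc
          simpa using fallback_eq m rest
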